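-- pv_equiv track=rewrite | github.com/tuanx18/my_leetcode_completion | 2840_check_if_strings_equal_ii.py | checkStrings
-- ===== SOURCE A (Python) =====
-- def checkStrings(s1: str, s2: str) -> bool:
--     even1 = {}
--     even2 = {}
--     odd1 = {}
--     odd2 = {}
--     i = 0
--     while i < len(s1):
--         if i % 2 == 0:
--             even1[s1[i]] = even1.get(s1[i], 0) + 1
--             even2[s2[i]] = even2.get(s2[i], 0) + 1
--         else:
--             odd1[s1[i]] = odd1.get(s1[i], 0) + 1
--             odd2[s2[i]] = odd2.get(s2[i], 0) + 1
--         i += 1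
--     for k, v in even1.items():
--         if v != even2.get(k, 0):
--             return False
--     for k, v in odd1.items():
--         if v != odd2.get(k, 0):
--             return False
--     return True
-- ===== SOURCE B (Python) =====
-- def checkStrings(s1: str, s2: str) -> bool:
--     even1, even2, odd1, odd2 = [], [], [], []
--     for i in range(len(s1)):
--         if i % 2 == 0:
--             even1.append(s1[i])
--             even2.append(s2[i])
--         else:
--             odd1.append(s1[i])
--             odd2.append(s2[i])
--     return sorted(even1) == sorted(even2) and sorted(odd1) == sorted(odd2)
-- ===== Notes on version B (the rewrite author's own statement) =====
-- stated objective: simpler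
-- what changed: Replaces the four frequency dictionaries and the one-sided count-comparison loops by collecting the even/odd-position characters of each string into four plain lists and comparing sorted lists (multiset equality by sorting).
import Mathlib
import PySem

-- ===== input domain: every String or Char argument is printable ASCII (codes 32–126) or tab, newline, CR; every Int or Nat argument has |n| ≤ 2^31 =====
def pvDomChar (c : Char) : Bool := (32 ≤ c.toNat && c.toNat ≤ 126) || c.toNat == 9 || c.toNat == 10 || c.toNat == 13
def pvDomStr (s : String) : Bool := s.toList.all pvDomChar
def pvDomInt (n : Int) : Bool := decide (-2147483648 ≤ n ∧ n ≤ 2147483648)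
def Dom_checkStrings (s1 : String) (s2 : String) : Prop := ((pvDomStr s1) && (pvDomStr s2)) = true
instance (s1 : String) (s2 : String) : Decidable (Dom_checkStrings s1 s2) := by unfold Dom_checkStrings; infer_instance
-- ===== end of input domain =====

-- B replaces A's four frequency dictionaries and count-comparison loops by four parity-grouped
-- character lists compared after sorting (multiset equality by sorting) — objective: simpler.

-- ===== PORT A =====
-- state: (even1, even2, odd1, odd2) counting dictionaries
def pvStepA (l1 l2 : List Char)
    (st : PySem.Dict Char Int × PySem.Dict Char Int × PySem.Dict Char Int × PySem.Dict Char Int)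
    (i : Int) :
    PySem.Dict Char Int × PySem.Dict Char Int × PySem.Dict Char Int × PySem.Dict Char Int :=
  let c1 := PySem.List.pyGetD l1 i ' '    -- s1[i]; in range on every input admitted by Pre_
  let c2 := PySem.List.pyGetD l2 i ' '    -- s2[i]
  if PySem.Int.mod i 2 == 0 then
    (st.1.insert c1 (st.1.getD c1 0 + 1), st.2.1.insert c2 (st.2.1.getD c2 0 + 1), st.2.2.1, st.2.2.2)
  else
    (st.1, st.2.1, st.2.2.1.insert c1 (st.2.2.1.getD c1 0 + 1), st.2.2.2.insert c2 (st.2.2.2.getD c2 0 + 1))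

def checkStrings (s1 : String) (s2 : String) : Bool :=
  let l1 := s1.toList
  let l2 := s2.toList
  let st := (PySem.List.pyRange 0 (l1.length : Int)).foldl (pvStepA l1 l2)
    (PySem.Dict.empty, PySem.Dict.empty, PySem.Dict.empty, PySem.Dict.empty)
  -- the two for-loops with early 'return False' are List.all over the items
  (st.1.items.all (fun kv => kv.2 == st.2.1.getD kv.1 0)) &&
  (st.2.2.1.items.all (fun kv => kv.2 == st.2.2.2.getD kv.1 0))

-- ===== PORT B =====
-- state: (even1, even2, odd1, odd2) plain character lists
def pvStepB (l1 l2 : List Char)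
    (st : List Char × List Char × List Char × List Char) (i : Int) :
    List Char × List Char × List Char × List Char :=
  let c1 := PySem.List.pyGetD l1 i ' '
  let c2 := PySem.List.pyGetD l2 i ' '
  if PySem.Int.mod i 2 == 0 then
    (st.1 ++ [c1], st.2.1 ++ [c2], st.2.2.1, st.2.2.2)
  else
    (st.1, st.2.1, st.2.2.1 ++ [c1], st.2.2.2 ++ [c2])

def checkStrings_alt (s1 : String) (s2 : String) : Bool :=
  let l1 := s1.toList
  let l2 := s2.toList
  let st := (PySem.List.pyRange 0 (l1.length : Int)).foldl (pvStepB l1 l2) ([], [], [], [])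
  (PySem.List.sorted st.1 (fun c => c) == PySem.List.sorted st.2.1 (fun c => c)) &&
  (PySem.List.sorted st.2.2.1 (fun c => c) == PySem.List.sorted st.2.2.2 (fun c => c))

-- ===== PRECONDITION & SPEC =====
-- Pre_ excludes exactly the inputs with len(s2) < len(s1), on which Python A raises IndexError at s2[i]
def Pre_checkStrings (s1 : String) (s2 : String) : Prop :=
  PySem.Str.len s1 ≤ PySem.Str.len s2
instance (s1 : String) (s2 : String) : Decidable (Pre_checkStrings s1 s2) := by
  unfold Pre_checkStrings; infer_instance
def pvWitness_checkStrings : String × String := ("abab", "baba")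

def Spec_checkStrings (s1 : String) (s2 : String) (out : Bool) : Prop := out = checkStrings_alt s1 s2
instance (s1 : String) (s2 : String) (out : Bool) : Decidable (Spec_checkStrings s1 s2 out) := by
  unfold Spec_checkStrings; infer_instance

-- ===== CLAIM (what is proved, stated in full; the proofs are below) =====
def Claim_equal_checkStrings : Prop := ∀ (s1 : String) (s2 : String), Dom_checkStrings s1 s2 → Pre_checkStrings s1 s2 → Spec_checkStrings s1 s2 (checkStrings s1 s2)

-- ===== LEMMAS AND PROOFS =====

-- appending one element to a counted list is exactly A's insert-with-getD+1 step
lemma counter_concat (l : List Char) (c : Char) :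
    PySem.Dict.counter (l ++ [c])
      = (PySem.Dict.counter l).insert c ((PySem.Dict.counter l).getD c 0 + 1) := by
  simp [PySem.Dict.counter, PySem.Dict.modify]

-- A's fold state is the counter of B's fold state, over any index list
lemma fold_link (l1 l2 : List Char) (is : List Int) (e1 e2 o1 o2 : List Char) :
    is.foldl (pvStepA l1 l2)
      (PySem.Dict.counter e1, PySem.Dict.counter e2, PySem.Dict.counter o1, PySem.Dict.counter o2)
    = (PySem.Dict.counter (is.foldl (pvStepB l1 l2) (e1, e2, o1, o2)).1,
       PySem.Dict.counter (is.foldl (pvStepB l1 l2) (e1, e2, o1, o2)).2.1,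
       PySem.Dict.counter (is.foldl (pvStepB l1 l2) (e1, e2, o1, o2)).2.2.1,
       PySem.Dict.counter (is.foldl (pvStepB l1 l2) (e1, e2, o1, o2)).2.2.2) := by
  induction is generalizing e1 e2 o1 o2 with
  | nil => rfl
  | cons i is ih =>
    simp only [List.foldl_cons]
    by_cases h : PySem.Int.mod i 2 == 0
    · rw [show pvStepA l1 l2 (PySem.Dict.counter e1, PySem.Dict.counter e2,
            PySem.Dict.counter o1, PySem.Dict.counter o2) i
          = (PySem.Dict.counter (e1 ++ [PySem.List.pyGetD l1 i ' ']),
             PySem.Dict.counter (e2 ++ [PySem.List.pyGetD l2 i ' ']),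
             PySem.Dict.counter o1, PySem.Dict.counter o2) by
            simp only [pvStepA, if_pos h, counter_concat]]
      rw [show pvStepB l1 l2 (e1, e2, o1, o2) i
          = (e1 ++ [PySem.List.pyGetD l1 i ' '], e2 ++ [PySem.List.pyGetD l2 i ' '], o1, o2) by
            simp only [pvStepB, if_pos h]]
      exact ih _ _ _ _
    · rw [show pvStepA l1 l2 (PySem.Dict.counter e1, PySem.Dict.counter e2,
            PySem.Dict.counter o1, PySem.Dict.counter o2) i
          = (PySem.Dict.counter e1, PySem.Dict.counter e2,
             PySem.Dict.counter (o1 ++ [PySem.List.pyGetD l1 i ' ']),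
             PySem.Dict.counter (o2 ++ [PySem.List.pyGetD l2 i ' '])) by
            simp only [pvStepA, if_neg h, counter_concat]]
      rw [show pvStepB l1 l2 (e1, e2, o1, o2) i
          = (e1, e2, o1 ++ [PySem.List.pyGetD l1 i ' '], o2 ++ [PySem.List.pyGetD l2 i ' ']) by
            simp only [pvStepB, if_neg h]]
      exact ih _ _ _ _

-- B's fold keeps the paired lists the same length
lemma fold_lens (l1 l2 : List Char) (is : List Int) (e1 e2 o1 o2 : List Char)
    (he : e1.length = e2.length) (ho : o1.length = o2.length) :
    (is.foldl (pvStepB l1 l2) (e1, e2, o1, o2)).1.length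
      = (is.foldl (pvStepB l1 l2) (e1, e2, o1, o2)).2.1.length
    ∧ (is.foldl (pvStepB l1 l2) (e1, e2, o1, o2)).2.2.1.length
      = (is.foldl (pvStepB l1 l2) (e1, e2, o1, o2)).2.2.2.length := by
  induction is generalizing e1 e2 o1 o2 with
  | nil => exact ⟨he, ho⟩
  | cons i is ih =>
    simp only [List.foldl_cons, pvStepB]
    by_cases h : PySem.Int.mod i 2 == 0
    · simp only [if_pos h]
      exact ih _ _ _ _ (by simp [he]) ho
    · simp only [if_neg h]
      exact ih _ _ _ _ he (by simp [ho])

-- sorted-list equality is multiset equality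
lemma sorted_beq_iff_perm (x y : List Char) :
    (PySem.List.sorted x (fun c => c) == PySem.List.sorted y (fun c => c)) = true ↔ x.Perm y := by
  rw [beq_iff_eq]
  constructor
  · intro h
    exact ((PySem.List.sorted_perm x (fun c => c) false).symm.trans
      (h ▸ PySem.List.sorted_perm y (fun c => c) false))
  · intro h
    exact List.Perm.eq_of_pairwise (fun a b _ _ hab hba => le_antisymm hab hba)
      (PySem.List.sorted_pairwise x (fun c => c)) (PySem.List.sorted_pairwise y (fun c => c))
      ((PySem.List.sorted_perm x (fun c => c) false).trans
        (h.trans (PySem.List.sorted_perm y (fun c => c) false).symm))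

-- A's one-sided items check over counters is the per-member count comparison
lemma items_all_iff (x y : List Char) :
    ((PySem.Dict.counter x).items.all
        (fun kv => kv.2 == (PySem.Dict.counter y).getD kv.1 0)) = true
      ↔ ∀ c ∈ x, (x.count c : Int) = (y.count c : Int) := by
  have hnd : (PySem.Dict.counter x).keys.Nodup := by
    unfold PySem.Dict.counter
    exact PySem.Dict.nodup_keys_foldl_modify_key x (fun c => c) 0
      (fun _ _ v => v + 1) PySem.Dict.empty (by simp [PySem.Dict.empty, PySem.Dict.keys])
  have hkeys : ∀ c, c ∈ (PySem.Dict.counter x).keys ↔ c ∈ x := by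
    intro c
    unfold PySem.Dict.counter
    rw [PySem.Dict.keys_foldl_modify x 0 (fun _ _ v => v + 1) PySem.Dict.empty,
      PySem.Set.mem_update]
    simp [PySem.Dict.empty, PySem.Dict.keys]
  rw [PySem.Dict.items_eq_map_keys _ hnd 0]
  simp only [List.all_map, List.all_eq_true]
  constructor
  · intro h c hc
    have := h c ((hkeys c).mpr hc)
    simpa [PySem.Dict.getD_counter] using this
  · intro h c hc
    have := h c ((hkeys c).mp hc)
    simpa [PySem.Dict.getD_counter] using this

-- one-sided count agreement plus equal length is multiset equality
lemma counts_iff_perm (x y : List Char) (hlen : x.length = y.length) :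
    (∀ c ∈ x, (x.count c : Int) = (y.count c : Int)) ↔ x.Perm y := by
  constructor
  · intro h
    have hle : (x : Multiset Char) ≤ (y : Multiset Char) := by
      rw [Multiset.le_iff_count]
      intro a
      by_cases ha : a ∈ x
      · have := h a ha
        simp only [Multiset.coe_count]
        omega
      · simp [Multiset.coe_count, List.count_eq_zero_of_not_mem ha]
    have : (x : Multiset Char) = (y : Multiset Char) :=
      Multiset.eq_of_le_of_card_le hle (by simpa [Multiset.coe_card] using hlen.ge)
    exact Multiset.coe_eq_coe.mp this
  · intro h c _
    exact_mod_cast h.count_eq c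

-- the two final checks agree on equal-length lists
lemma check_eq (x y : List Char) (hlen : x.length = y.length) :
    ((PySem.Dict.counter x).items.all
        (fun kv => kv.2 == (PySem.Dict.counter y).getD kv.1 0))
      = (PySem.List.sorted x (fun c => c) == PySem.List.sorted y (fun c => c)) := by
  rw [Bool.eq_iff_iff, items_all_iff, sorted_beq_iff_perm, counts_iff_perm x y hlen]

-- ===== VERDICT (by name: the statement is the Claim_ definition above) =====
theorem checkStrings_spec : Claim_equal_checkStrings := by
  unfold Claim_equal_checkStrings
  intro s1 s2 _ _
  unfold Spec_checkStrings checkStrings checkStrings_alt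
  simp only []
  have hlink := fold_link s1.toList s2.toList
    (PySem.List.pyRange 0 (s1.toList.length : Int)) [] [] [] []
  have hctr0 : PySem.Dict.counter ([] : List Char) = PySem.Dict.empty := rfl
  rw [hctr0] at hlink
  rw [hlink]
  obtain ⟨he, ho⟩ := fold_lens s1.toList s2.toList
    (PySem.List.pyRange 0 (s1.toList.length : Int)) [] [] [] [] rfl rfl
  rw [check_eq _ _ he, check_eq _ _ ho]
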